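-- pv_equiv track=rewrite | github.com/onurefe/SymmetryLens | ablation_experiment_runner.py | find_gpu_index
-- ===== SOURCE A (Python) =====
-- NUM_PROCESS_PER_GPUS = [0, 3, 3, 0]
--
-- def find_gpu_index(process_index):
--     gpu_index = -1
--     for i in range(4):
--         if sum(NUM_PROCESS_PER_GPUS[0 : i + 1]) > process_index:
--             gpu_index = i
--             break
--
--     if gpu_index != -1:
--         return gpu_index
--     else:
--         raise RuntimeError("GPU process capacity have been exceeded.")
-- ===== SOURCE B (Python) =====
-- NUM_PROCESS_PER_GPUS = [0, 3, 3, 0]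
--
-- def find_gpu_index(process_index):
--     running = 0
--     for i, n in enumerate(NUM_PROCESS_PER_GPUS):
--         running += n
--         if running > process_index:
--             return i
--     raise RuntimeError("GPU process capacity have been exceeded.")
-- ===== Notes on version B (the rewrite author's own statement) =====
-- stated objective: simpler
-- what changed: B replaces the indexed range(4) loop with break/sentinel and its per-step prefix-slice re-summation by a single enumerate pass keeping a running prefix total and returning directly.
import Mathlib
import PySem

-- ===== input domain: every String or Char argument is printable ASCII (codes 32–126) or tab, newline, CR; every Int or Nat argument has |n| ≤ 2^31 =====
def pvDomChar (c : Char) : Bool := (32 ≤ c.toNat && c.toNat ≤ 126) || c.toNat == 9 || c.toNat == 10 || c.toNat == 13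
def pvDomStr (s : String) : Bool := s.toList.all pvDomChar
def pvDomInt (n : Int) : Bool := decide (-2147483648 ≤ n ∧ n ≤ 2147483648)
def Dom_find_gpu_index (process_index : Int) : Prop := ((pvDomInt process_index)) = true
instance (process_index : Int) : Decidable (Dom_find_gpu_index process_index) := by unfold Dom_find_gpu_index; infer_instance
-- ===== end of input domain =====

-- B replaces A's range(4) loop that re-sums the prefix slice each step (with a -1 sentinel
-- and break) by one enumerate pass keeping a running prefix total; objective: simpler.

-- ===== PORT A =====
def NUM_PROCESS_PER_GPUS : List Int := [0, 3, 3, 0]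

-- A's for-loop with break: first i in range(4) whose prefix-slice sum exceeds process_index, else the sentinel -1.
def pvA_loop (process_index : Int) : List Int → Int
  | [] => -1
  | i :: rest =>
    if (PySem.List.slice NUM_PROCESS_PER_GPUS (some 0) (some (i + 1))).sum > process_index then i
    else pvA_loop process_index rest

-- Python raises RuntimeError when gpu_index = -1; those inputs are excluded by Pre_ (port returns -1 there).
def find_gpu_index (process_index : Int) : Int :=
  let gpu_index := pvA_loop process_index (PySem.List.pyRange 0 4 1)
  if gpu_index ≠ -1 then gpu_index else -1

-- ===== PORT B =====
-- B's enumerate pass with running prefix total; the trailing raise is outside Pre_ (port returns -1 there).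
def pvB_loop (process_index : Int) (running : Int) : List (Int × Int) → Int
  | [] => -1
  | (i, n) :: rest =>
    if running + n > process_index then i else pvB_loop process_index (running + n) rest

def find_gpu_index_alt (process_index : Int) : Int :=
  pvB_loop process_index 0 (PySem.List.enumerate NUM_PROCESS_PER_GPUS)

-- ===== PRECONDITION & SPEC =====
-- Pre_ excludes exactly the inputs where Python A raises RuntimeError (process_index ≥ total capacity 6).
def Pre_find_gpu_index (process_index : Int) : Prop := process_index < 6
instance (process_index : Int) : Decidable (Pre_find_gpu_index process_index) := by unfold Pre_find_gpu_index; infer_instance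
def pvWitness_find_gpu_index : Int := 2

def Spec_find_gpu_index (process_index : Int) (out : Int) : Prop := out = find_gpu_index_alt process_index
instance (process_index : Int) (out : Int) : Decidable (Spec_find_gpu_index process_index out) := by unfold Spec_find_gpu_index; infer_instance

-- ===== CLAIM (what is proved, stated in full; the proofs are below) =====
def Claim_equal_find_gpu_index : Prop := ∀ (process_index : Int), Dom_find_gpu_index process_index → Pre_find_gpu_index process_index → Spec_find_gpu_index process_index (find_gpu_index process_index)

-- ===== LEMMAS AND PROOFS =====

-- ===== VERDICT (by name: the statement is the Claim_ definition above) =====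
theorem find_gpu_index_spec : Claim_equal_find_gpu_index := by
  intro p _ hp
  unfold Pre_find_gpu_index at hp
  unfold Spec_find_gpu_index find_gpu_index find_gpu_index_alt
  have hr : PySem.List.pyRange 0 4 1 = [0, 1, 2, 3] := by decide
  rw [hr]
  norm_num [pvA_loop, pvB_loop, NUM_PROCESS_PER_GPUS, PySem.List.slice,
    PySem.List.enumerate, Int.toNat]
  split_ifs <;> simp
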